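-- pv_equiv track=rewrite | github.com/edlansiaux/projet-file-rouge | scripts/recuit_simulé.py | build_gantt_data
-- ===== SOURCE A (Python) =====
-- def build_gantt_data(task_times, skills):
--     """
--     Re-formate task_times -> dict skill -> liste d'items triés
--     """
--     by_skill = {s: [] for s in skills}
--     horizon = 0
--     for (i, j, s), (start, finish, p) in task_times.items():
--         by_skill[s].append({
--             "start": start, "end": finish, "dur": p,
--             "patient": i, "op": j
--         })
--         horizon = max(horizon, finish)
--
--     for s in skills:
--         by_skill[s].sort(key=lambda x: (x["start"], x["patient"], x["op"]))
--
--     return by_skill, horizon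
-- ===== SOURCE B (Python) =====
-- def build_gantt_data(task_times, skills):
--     """
--     Re-formate task_times -> dict skill -> liste d'items triés
--     (one global stable sort + a bucketing pass instead of per-skill sorts)
--     """
--     by_skill = {s: [] for s in skills}
--     horizon = 0
--     flat = []
--     for (i, j, s), (start, finish, p) in task_times.items():
--         if finish > horizon:
--             horizon = finish
--         flat.append((start, i, j, s,
--                      {"start": start, "end": finish, "dur": p,
--                       "patient": i, "op": j}))
--     flat.sort(key=lambda t: (t[0], t[1], t[2]))
--     for _, _, _, s, item in flat:
--         by_skill[s].append(item)
--     return by_skill, horizon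
-- ===== Notes on version B (the rewrite author's own statement) =====
-- stated objective: alternative
-- what changed: Instead of appending items into per-skill buckets and then sorting each bucket, B builds one flat list of (start, i, j, skill, item) tuples (computing the horizon in the same pass), sorts it once globally by the same (start, patient, op) key, and then distributes the already-sorted items into the pre-initialized buckets in a single pass; stability of the sort makes the buckets identical.
-- outside the precondition, e.g. on build_gantt_data({(1, 1, 'a'): (0, 5, 2)}, []): A raises KeyError, B raises KeyError
import Mathlib
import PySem

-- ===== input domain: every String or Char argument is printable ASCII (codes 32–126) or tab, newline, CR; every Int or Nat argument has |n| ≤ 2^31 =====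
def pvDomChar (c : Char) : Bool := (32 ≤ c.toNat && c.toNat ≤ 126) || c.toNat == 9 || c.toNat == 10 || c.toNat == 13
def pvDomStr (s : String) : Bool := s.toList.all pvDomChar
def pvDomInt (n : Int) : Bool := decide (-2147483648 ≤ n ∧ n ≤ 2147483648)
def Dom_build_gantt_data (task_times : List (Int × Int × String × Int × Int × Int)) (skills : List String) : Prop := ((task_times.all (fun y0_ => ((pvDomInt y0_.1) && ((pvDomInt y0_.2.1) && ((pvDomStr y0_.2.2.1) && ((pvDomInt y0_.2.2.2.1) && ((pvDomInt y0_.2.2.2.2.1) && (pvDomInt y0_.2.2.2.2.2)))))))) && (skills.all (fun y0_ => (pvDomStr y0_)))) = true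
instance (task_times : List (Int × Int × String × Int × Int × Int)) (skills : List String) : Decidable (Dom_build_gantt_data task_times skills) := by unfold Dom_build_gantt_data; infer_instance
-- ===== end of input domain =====

-- B replaces A's per-skill sorts by one global stable sort of a flat list plus a bucketing pass (objective: simpler decomposition).
-- A task_times entry (i, j, s, start, finish, p) stands for the dict item ((i, j, s)) ↦ (start, finish, p).

-- ===== PORT A =====
-- the item dict {"start": …, "end": …, "dur": …, "patient": …, "op": …} (insertion order)
def pvItem (i j st fi p : Int) : List (String × Int) :=
  [("start", st), ("end", fi), ("dur", p), ("patient", i), ("op", j)]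

-- x[k] for the items above (hand-ported dict lookup: first match; the key is always present on the items built here)
def pvLook (x : List (String × Int)) (k : String) : Int :=
  (Option.map (fun q => q.2) (x.find? (fun q => q.1 == k))).getD 0

-- Python's lexicographic tuple comparison on an (Int, Int, Int) key, exact for int components
def pvLex3 (t : Int × Int × Int) : Int ×ₗ Int ×ₗ Int := toLex (t.1, toLex (t.2.1, t.2.2))

-- key=lambda x: (x["start"], x["patient"], x["op"])
def pvItemKey (x : List (String × Int)) : Int ×ₗ Int ×ₗ Int :=
  pvLex3 (pvLook x "start", pvLook x "patient", pvLook x "op")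

def build_gantt_data (task_times : List (Int × Int × String × Int × Int × Int)) (skills : List String) : (List (String × List (List (String × Int)))) × Int :=
  -- by_skill = {s: [] for s in skills}
  let by_skill : PySem.Dict String (List (List (String × Int))) :=
    skills.foldl (fun d s => d.insert s []) PySem.Dict.empty
  -- for (i, j, s), (start, finish, p) in task_times.items(): append + horizon
  let st := task_times.foldl
    (fun (acc : PySem.Dict String (List (List (String × Int))) × Int) t =>
      (acc.1.modify t.2.2.1 [] (fun l => l ++ [pvItem t.1 t.2.1 t.2.2.2.1 t.2.2.2.2.1 t.2.2.2.2.2]),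
       max acc.2 t.2.2.2.2.1))
    (by_skill, 0)
  -- for s in skills: by_skill[s].sort(key=…)
  let d2 := skills.foldl (fun d s => d.modify s [] (fun l => PySem.List.sorted l pvItemKey)) st.1
  (d2.items, st.2)

-- ===== PORT B =====
def build_gantt_data_alt (task_times : List (Int × Int × String × Int × Int × Int)) (skills : List String) : (List (String × List (List (String × Int)))) × Int :=
  -- by_skill = {s: [] for s in skills}
  let by_skill : PySem.Dict String (List (List (String × Int))) :=
    skills.foldl (fun d s => d.insert s []) PySem.Dict.empty
  -- one pass: horizon and the flat list of (start, i, j, s, item) tuples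
  let st := task_times.foldl
    (fun (acc : Int × List ((Int × Int × Int) × String × List (String × Int))) t =>
      ((if t.2.2.2.2.1 > acc.1 then t.2.2.2.2.1 else acc.1),
       acc.2 ++ [((t.2.2.2.1, t.1, t.2.1), t.2.2.1, pvItem t.1 t.2.1 t.2.2.2.1 t.2.2.2.2.1 t.2.2.2.2.2)]))
    (0, [])
  -- flat.sort(key=lambda t: (t[0], t[1], t[2]))
  let flat := PySem.List.sorted st.2 (fun u => pvLex3 u.1)
  -- distribute into the pre-initialized buckets
  let d := flat.foldl (fun d u => d.modify u.2.1 [] (fun l => l ++ [u.2.2])) by_skill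
  (d.items, st.1)

-- ===== PRECONDITION & SPEC =====
-- Pre_ excludes (a) inputs where some task's skill is missing from skills — there Python A raises KeyError —
-- and (b) association lists with duplicate (i, j, s) keys, which do not represent a Python dict
-- (dict construction would collapse them); on those A and B agree anyway, the list is just not a dict.
def Pre_build_gantt_data (task_times : List (Int × Int × String × Int × Int × Int)) (skills : List String) : Prop :=
  (∀ t ∈ task_times, t.2.2.1 ∈ skills) ∧ (task_times.map (fun t => (t.1, t.2.1, t.2.2.1))).Nodup
instance (task_times : List (Int × Int × String × Int × Int × Int)) (skills : List String) : Decidable (Pre_build_gantt_data task_times skills) := by unfold Pre_build_gantt_data; infer_instance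

def pvWitness_build_gantt_data : (List (Int × Int × String × Int × Int × Int)) × List String :=
  ([(1, 0, "a", 2, 5, 3), (0, 0, "a", 0, 4, 4), (0, 1, "b", 4, 6, 2)], ["a", "b"])

def Spec_build_gantt_data (task_times : List (Int × Int × String × Int × Int × Int)) (skills : List String) (out : (List (String × List (List (String × Int)))) × Int) : Prop := out = build_gantt_data_alt task_times skills
instance (task_times : List (Int × Int × String × Int × Int × Int)) (skills : List String) (out : (List (String × List (List (String × Int)))) × Int) : Decidable (Spec_build_gantt_data task_times skills out) := by unfold Spec_build_gantt_data; infer_instance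

-- ===== CLAIM (what is proved, stated in full; the proofs are below) =====
def Claim_equal_build_gantt_data : Prop := ∀ (task_times : List (Int × Int × String × Int × Int × Int)) (skills : List String), Dom_build_gantt_data task_times skills → Pre_build_gantt_data task_times skills → Spec_build_gantt_data task_times skills (build_gantt_data task_times skills)

-- ===== LEMMAS AND PROOFS =====

-- insertBy with a true "before" at every element of the list puts x in front
theorem pv_insertBy_of_lt_all {α κ : Type} [LinearOrder κ] (k : α → κ) (x : α) (l : List α)
    (h : ∀ z ∈ l, k x < k z) :
    PySem.List.insertBy (fun a b => decide (k a < k b)) x l = x :: l := by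
  cases l with
  | nil => rfl
  | cons y ys =>
    have : decide (k x < k y) = true := decide_eq_true (h y (by simp))
    show (if decide (k x < k y) = true then _ else _) = _
    simp [this]

-- insertion keeps the accumulator key-sorted
theorem pv_pairwise_insertBy {α κ : Type} [LinearOrder κ] (k : α → κ) (x : α) (ys : List α)
    (h : ys.Pairwise (fun a b => k a ≤ k b)) :
    (PySem.List.insertBy (fun a b => decide (k a < k b)) x ys).Pairwise (fun a b => k a ≤ k b) := by
  induction ys with
  | nil => simp [PySem.List.insertBy]
  | cons y ys ih =>
    show (if decide (k x < k y) = true then x :: y :: ys else y :: PySem.List.insertBy _ x ys).Pairwise _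
    rcases List.pairwise_cons.mp h with ⟨hy, hys⟩
    by_cases hxy : k x < k y
    · simp only [decide_eq_true hxy, if_true]
      refine List.pairwise_cons.mpr ⟨?_, h⟩
      intro z hz
      rcases List.mem_cons.mp hz with rfl | hz
      · exact le_of_lt hxy
      · exact le_of_lt (lt_of_lt_of_le hxy (hy z hz))
    · simp only [decide_eq_false hxy, Bool.false_eq_true, if_false]
      refine List.pairwise_cons.mpr ⟨?_, ih hys⟩
      intro z hz
      rcases (PySem.List.mem_insertBy _ x z ys).mp hz with rfl | hz
      · exact le_of_not_gt hxy
      · exact hy z hz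

-- filter commutes with inserting into a key-sorted list
theorem pv_filter_insertBy {α κ : Type} [LinearOrder κ] (k : α → κ) (p : α → Bool) (x : α)
    (ys : List α) (h : ys.Pairwise (fun a b => k a ≤ k b)) :
    (PySem.List.insertBy (fun a b => decide (k a < k b)) x ys).filter p
      = if p x then PySem.List.insertBy (fun a b => decide (k a < k b)) x (ys.filter p)
        else ys.filter p := by
  induction ys with
  | nil =>
    show (List.filter p [x]) = _
    cases hp : p x <;> simp [List.filter, hp, PySem.List.insertBy]
  | cons y ys ih =>
    rcases List.pairwise_cons.mp h with ⟨hy, hys⟩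
    by_cases hxy : k x < k y
    · have e1 : PySem.List.insertBy (fun a b => decide (k a < k b)) x (y :: ys) = x :: y :: ys := by
        show (if decide (k x < k y) = true then _ else _) = _
        simp [hxy]
      have hall : ∀ z ∈ (y :: ys).filter p, k x < k z := by
        intro z hz
        rcases List.mem_cons.mp (List.mem_of_mem_filter hz) with rfl | hz'
        · exact hxy
        · exact lt_of_lt_of_le hxy (hy z hz')
      rw [e1]
      by_cases hp : p x = true
      · rw [List.filter_cons, if_pos hp, if_pos hp, pv_insertBy_of_lt_all k x _ hall]
      · rw [List.filter_cons, if_neg hp, if_neg hp]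
    · have e2 : PySem.List.insertBy (fun a b => decide (k a < k b)) x (y :: ys)
          = y :: PySem.List.insertBy (fun a b => decide (k a < k b)) x ys := by
        show (if decide (k x < k y) = true then _ else _) = _
        simp [hxy]
      have e3 : PySem.List.insertBy (fun a b => decide (k a < k b)) x (y :: ys.filter p)
          = y :: PySem.List.insertBy (fun a b => decide (k a < k b)) x (ys.filter p) := by
        show (if decide (k x < k y) = true then _ else _) = _
        simp [hxy]
      rw [e2, List.filter_cons, ih hys, List.filter_cons]
      by_cases hpy : p y = true <;> by_cases hpx : p x = true <;> simp [hpy, hpx, e3]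

theorem pv_filter_foldl {α κ : Type} [LinearOrder κ] (k : α → κ) (p : α → Bool)
    (l : List α) (acc : List α) (h : acc.Pairwise (fun a b => k a ≤ k b)) :
    (l.foldl (fun a x => PySem.List.insertBy (fun a b => decide (k a < k b)) x a) acc).filter p
      = (l.filter p).foldl (fun a x => PySem.List.insertBy (fun a b => decide (k a < k b)) x a)
          (acc.filter p) := by
  induction l generalizing acc with
  | nil => rfl
  | cons x l ih =>
    rw [List.foldl_cons, ih _ (pv_pairwise_insertBy k x acc h), pv_filter_insertBy k p x acc h,
      List.filter_cons]
    cases hp : p x <;> simp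

-- filtering a stable sort = sorting the filter
theorem pv_filter_sorted {α κ : Type} [LinearOrder κ] (k : α → κ) (p : α → Bool) (xs : List α) :
    (PySem.List.sorted xs k).filter p = PySem.List.sorted (xs.filter p) k := by
  rw [PySem.List.sorted_eq_foldl_insertBy, PySem.List.sorted_eq_foldl_insertBy]
  simpa using pv_filter_foldl k p xs [] (by simp)

theorem pv_insertBy_map {α β κ : Type} [LinearOrder κ] (f : β → α) (kA : α → κ) (kB : β → κ)
    (x : β) (ys : List β) (hx : kA (f x) = kB x) (hys : ∀ y ∈ ys, kA (f y) = kB y) :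
    PySem.List.insertBy (fun a b => decide (kA a < kA b)) (f x) (ys.map f)
      = (PySem.List.insertBy (fun a b => decide (kB a < kB b)) x ys).map f := by
  induction ys with
  | nil => rfl
  | cons y ys ih =>
    have hy := hys y (by simp)
    have eA : PySem.List.insertBy (fun a b => decide (kA a < kA b)) (f x) ((y :: ys).map f)
        = if decide (kB x < kB y) = true then f x :: f y :: ys.map f
          else f y :: PySem.List.insertBy (fun a b => decide (kA a < kA b)) (f x) (ys.map f) := by
      rw [show decide (kB x < kB y) = decide (kA (f x) < kA (f y)) from by rw [hx, hy]]
      rfl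
    have eB : PySem.List.insertBy (fun a b => decide (kB a < kB b)) x (y :: ys)
        = if decide (kB x < kB y) = true then x :: y :: ys
          else y :: PySem.List.insertBy (fun a b => decide (kB a < kB b)) x ys := rfl
    rw [eA, eB]
    cases hd : decide (kB x < kB y) <;>
      simp [ih (fun z hz => hys z (by simp [hz]))]

theorem pv_foldl_insertBy_map {α β κ : Type} [LinearOrder κ] (f : β → α) (kA : α → κ) (kB : β → κ)
    (l : List β) (acc : List β) (hl : ∀ y ∈ l, kA (f y) = kB y)
    (hacc : ∀ y ∈ acc, kA (f y) = kB y) :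
    (l.map f).foldl (fun a x => PySem.List.insertBy (fun a b => decide (kA a < kA b)) x a) (acc.map f)
      = (l.foldl (fun a x => PySem.List.insertBy (fun a b => decide (kB a < kB b)) x a) acc).map f := by
  induction l generalizing acc with
  | nil => rfl
  | cons x l ih =>
    rw [List.map_cons, List.foldl_cons, List.foldl_cons,
      pv_insertBy_map f kA kB x acc (hl x (by simp)) hacc]
    exact ih _ (fun z hz => hl z (by simp [hz]))
      (fun z hz => by
        rcases (PySem.List.mem_insertBy _ x z acc).mp hz with rfl | hz'
        · exact hl z (by simp)
        · exact hacc z hz')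

-- sorting mapped values by a key that factors through the map
theorem pv_sorted_map {α β κ : Type} [LinearOrder κ] (f : β → α) (kA : α → κ) (kB : β → κ)
    (xs : List β) (h : ∀ y ∈ xs, kA (f y) = kB y) :
    PySem.List.sorted (xs.map f) kA = (PySem.List.sorted xs kB).map f := by
  rw [PySem.List.sorted_eq_foldl_insertBy, PySem.List.sorted_eq_foldl_insertBy]
  simpa using pv_foldl_insertBy_map f kA kB xs [] h (by simp)

-- a dict with nodup keys is its key list paired with its lookups
theorem pv_items_eq_keys_map' {κ ν : Type} [BEq κ] [LawfulBEq κ] (d0 : ν) :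
    ∀ (l : List (κ × ν)), (l.map Prod.fst).Nodup →
      l = (l.map Prod.fst).map (fun k => (k, (PySem.Dict.mk l).getD k d0)) := by
  intro l
  induction l with
  | nil => intro _; rfl
  | cons q l ih =>
    obtain ⟨a, v⟩ := q
    intro h
    rcases List.pairwise_cons.mp h with ⟨hq, hl⟩
    have hhead : (PySem.Dict.mk ((a, v) :: l)).getD a d0 = v := by
      simp [PySem.Dict.getD, PySem.Dict.get?_mk_cons]
    rw [List.map_cons, List.map_cons, hhead]
    congr 1
    have hcong : (l.map Prod.fst).map (fun k => (k, (PySem.Dict.mk ((a, v) :: l)).getD k d0))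
        = (l.map Prod.fst).map (fun k => (k, (PySem.Dict.mk l).getD k d0)) := by
      refine List.map_congr_left (fun k hk => ?_)
      have hne : (a == k) = false := beq_eq_false_iff_ne.mpr (hq k hk)
      simp [PySem.Dict.getD, PySem.Dict.get?_mk_cons, hne]
    rw [hcong]
    exact ih hl

theorem pv_items_eq_keys_map {κ ν : Type} [BEq κ] [LawfulBEq κ] (d : PySem.Dict κ ν) (d0 : ν)
    (h : d.keys.Nodup) : d.items = d.keys.map (fun k => (k, d.getD k d0)) := by
  obtain ⟨l⟩ := d
  exact pv_items_eq_keys_map' d0 l (by simpa [PySem.Dict.keys] using h)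

-- the initialization loop leaves every bucket empty
theorem pv_getD_init (skills : List String) (c : String) :
    ∀ (d : PySem.Dict String (List (List (String × Int)))), d.getD c [] = [] →
      (skills.foldl (fun d s => d.insert s []) d).getD c [] = [] := by
  induction skills with
  | nil => intro d h; exact h
  | cons s sk ih =>
    intro d h
    rw [List.foldl_cons]
    exact ih _ (by rw [PySem.Dict.getD_insert]; split <;> simp [h])

-- the per-skill sort loop, seen through getD (sorting twice = sorting once)
theorem pv_getD_sortLoop (sk : List String) (c : String) :
    ∀ (d : PySem.Dict String (List (List (String × Int)))),
      (sk.foldl (fun d s => d.modify s [] (fun l => PySem.List.sorted l pvItemKey)) d).getD c []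
        = if c ∈ sk then PySem.List.sorted (d.getD c []) pvItemKey else d.getD c [] := by
  induction sk with
  | nil => intro d; simp
  | cons s sk ih =>
    intro d
    rw [List.foldl_cons, ih, PySem.Dict.getD_modify]
    by_cases hcs : c = s <;> by_cases hck : c ∈ sk <;>
      simp [hcs, hck, PySem.List.sorted_sorted]

theorem pv_update_self {α : Type} [BEq α] [LawfulBEq α] (s : PySem.Set α) (xs : List α)
    (h : ∀ x ∈ xs, x ∈ s) : PySem.Set.update s xs = s := by
  rw [PySem.Set.update_eq_append_filter]
  have hnil : List.filter (fun y => !PySem.Set.contains s y) (PySem.Set.ofList xs) = [] := by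
    rw [List.filter_eq_nil_iff]
    intro y hy
    have hmem : y ∈ s := h y ((PySem.Set.mem_ofList xs y).mp hy)
    simpa using hmem
  rw [hnil, List.append_nil]

theorem pv_foldl_prod {α β γ : Type} (f : β → α → β) (g : γ → α → γ) (l : List α) (b : β) (c : γ) :
    l.foldl (fun acc x => (f acc.1 x, g acc.2 x)) (b, c) = (l.foldl f b, l.foldl g c) := by
  induction l generalizing b c with
  | nil => rfl
  | cons x l ih => simpa using ih (f b x) (g c x)

theorem pv_foldl_append_map {α β : Type} (f : α → β) (l : List α) :
    ∀ (acc : List β), l.foldl (fun a x => a ++ [f x]) acc = acc ++ l.map f := by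
  induction l with
  | nil => simp
  | cons x l ih => intro acc; simp [ih]

-- the sort key of an item equals the (start, patient, op) triple it was built from
theorem pv_key_item (i j st fi p : Int) : pvItemKey (pvItem i j st fi p) = pvLex3 (st, i, j) := by
  rfl

-- proof-only abbreviations for the terms the two ports build
def pvItemOf (t : Int × Int × String × Int × Int × Int) : List (String × Int) :=
  pvItem t.1 t.2.1 t.2.2.2.1 t.2.2.2.2.1 t.2.2.2.2.2

def pvMkF (t : Int × Int × String × Int × Int × Int) :
    (Int × Int × Int) × String × List (String × Int) :=
  ((t.2.2.2.1, t.1, t.2.1), t.2.2.1, pvItemOf t)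

def pvD0 (skills : List String) : PySem.Dict String (List (List (String × Int))) :=
  skills.foldl (fun d s => d.insert s []) PySem.Dict.empty

theorem pv_keys_d0 (skills : List String) : (pvD0 skills).keys = PySem.Set.ofList skills := by
  have h := PySem.Dict.keys_foldl_insert (ν := List (List (String × Int)))
    skills (fun _ _ => []) PySem.Dict.empty
  rw [PySem.Dict.keys_empty, PySem.Set.update_nil_left] at h
  exact h

theorem pv_getD_d0 (skills : List String) (c : String) : (pvD0 skills).getD c [] = [] :=
  pv_getD_init skills c PySem.Dict.empty (PySem.Dict.getD_empty c [])

theorem pv_keysA (tts : List (Int × Int × String × Int × Int × Int)) (skills : List String)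
    (hs : ∀ t ∈ tts, t.2.2.1 ∈ skills) :
    (skills.foldl (fun d s => d.modify s [] (fun l => PySem.List.sorted l pvItemKey))
      (tts.foldl (fun d t => d.modify t.2.2.1 [] (fun l => l ++ [pvItemOf t])) (pvD0 skills))).keys
      = PySem.Set.ofList skills := by
  have k1 : (tts.foldl (fun d t => d.modify t.2.2.1 [] (fun l => l ++ [pvItemOf t]))
      (pvD0 skills)).keys = PySem.Set.ofList skills := by
    have h := PySem.Dict.keys_foldl_modify_key tts (fun t => t.2.2.1) []
      (fun _ t => fun l => l ++ [pvItemOf t]) (pvD0 skills)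
    rw [pv_keys_d0, pv_update_self _ _ ?hmem] at h
    · exact h
    case hmem =>
      intro x hx
      obtain ⟨t, ht, rfl⟩ := List.mem_map.mp hx
      exact (PySem.Set.mem_ofList skills _).mpr (hs t ht)
  have h2 := PySem.Dict.keys_foldl_modify skills []
    (fun _ _ => fun l => PySem.List.sorted l pvItemKey)
    (tts.foldl (fun d t => d.modify t.2.2.1 [] (fun l => l ++ [pvItemOf t])) (pvD0 skills))
  rw [k1, pv_update_self _ _ (fun x hx => (PySem.Set.mem_ofList skills x).mpr hx)] at h2
  exact h2

theorem pv_keysB (tts : List (Int × Int × String × Int × Int × Int)) (skills : List String)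
    (hs : ∀ t ∈ tts, t.2.2.1 ∈ skills) :
    ((PySem.List.sorted (tts.map pvMkF) (fun u => pvLex3 u.1)).foldl
      (fun d u => d.modify u.2.1 [] (fun l => l ++ [u.2.2])) (pvD0 skills)).keys
      = PySem.Set.ofList skills := by
  have h := PySem.Dict.keys_foldl_modify_key
    (PySem.List.sorted (tts.map pvMkF) (fun u => pvLex3 u.1)) (fun u => u.2.1) []
    (fun _ u => fun l => l ++ [u.2.2]) (pvD0 skills)
  rw [pv_keys_d0, pv_update_self _ _ ?hmem] at h
  · exact h
  case hmem =>
    intro x hx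
    obtain ⟨u, hu, rfl⟩ := List.mem_map.mp hx
    have hu' : u ∈ tts.map pvMkF := (PySem.List.mem_sorted _ _ _ _).mp hu
    obtain ⟨t, ht, rfl⟩ := List.mem_map.mp hu'
    exact (PySem.Set.mem_ofList skills _).mpr (hs t ht)

-- the A-side value of bucket c
theorem pv_hVA (tts : List (Int × Int × String × Int × Int × Int)) (skills : List String)
    (c : String) (hc : c ∈ skills) :
    (skills.foldl (fun d s => d.modify s [] (fun l => PySem.List.sorted l pvItemKey))
      (tts.foldl (fun d t => d.modify t.2.2.1 [] (fun l => l ++ [pvItemOf t])) (pvD0 skills))).getD c []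
      = PySem.List.sorted ((tts.filter (fun t => t.2.2.1 == c)).map pvItemOf) pvItemKey := by
  rw [pv_getD_sortLoop, if_pos hc]
  have hinner : (tts.foldl (fun d t => d.modify t.2.2.1 [] (fun l => l ++ [pvItemOf t]))
      (pvD0 skills)).getD c []
      = ((tts.map (fun t => (t.2.2.1, pvItemOf t))).filter (fun p => p.1 == c)).map (fun p => p.2) := by
    have h := PySem.Dict.getD_foldl_modify_append
      (tts.map (fun t => (t.2.2.1, pvItemOf t))) (pvD0 skills) c
    rw [List.foldl_map, pv_getD_d0, List.nil_append] at h
    exact h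
  rw [hinner, List.filter_map, List.map_map]
  rfl

-- the B-side value of bucket c
theorem pv_hVB (tts : List (Int × Int × String × Int × Int × Int)) (skills : List String)
    (c : String) :
    ((PySem.List.sorted (tts.map pvMkF) (fun u => pvLex3 u.1)).foldl
      (fun d u => d.modify u.2.1 [] (fun l => l ++ [u.2.2])) (pvD0 skills)).getD c []
      = PySem.List.sorted ((tts.filter (fun t => t.2.2.1 == c)).map pvItemOf) pvItemKey := by
  have h := PySem.Dict.getD_foldl_modify_append
    ((PySem.List.sorted (tts.map pvMkF) (fun u => pvLex3 u.1)).map (fun u => (u.2.1, u.2.2)))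
    (pvD0 skills) c
  rw [List.foldl_map, pv_getD_d0, List.nil_append] at h
  have h2 : ((PySem.List.sorted (tts.map pvMkF) (fun u => pvLex3 u.1)).foldl
      (fun d u => d.modify u.2.1 [] (fun l => l ++ [u.2.2])) (pvD0 skills)).getD c []
      = ((PySem.List.sorted (tts.map pvMkF) (fun u => pvLex3 u.1)).filter
          (fun u => u.2.1 == c)).map (fun u => u.2.2) := by
    rw [show ((PySem.List.sorted (tts.map pvMkF) (fun u => pvLex3 u.1)).filter
          (fun u => u.2.1 == c)).map (fun u => u.2.2)
        = (((PySem.List.sorted (tts.map pvMkF) (fun u => pvLex3 u.1)).map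
            (fun u => (u.2.1, u.2.2))).filter (fun p => p.1 == c)).map (fun p => p.2) from by
        rw [List.filter_map, List.map_map]; rfl]
    exact h
  rw [h2, pv_filter_sorted (fun u => pvLex3 u.1) (fun u => u.2.1 == c) (tts.map pvMkF),
    List.filter_map]
  have hmemkey : ∀ u ∈ (tts.filter ((fun u => u.2.1 == c) ∘ pvMkF)).map pvMkF,
      pvItemKey u.2.2 = pvLex3 u.1 := by
    intro u hu
    obtain ⟨t, _, rfl⟩ := List.mem_map.mp hu
    exact pv_key_item t.1 t.2.1 t.2.2.2.1 t.2.2.2.2.1 t.2.2.2.2.2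
  rw [← pv_sorted_map (fun u => u.2.2) pvItemKey (fun u => pvLex3 u.1)
      ((tts.filter ((fun u => u.2.1 == c) ∘ pvMkF)).map pvMkF) hmemkey, List.map_map]
  rfl

theorem pv_items_of_keys {κ ν : Type} [BEq κ] [LawfulBEq κ] (d : PySem.Dict κ ν) (d0 : ν)
    (K : List κ) (hK : d.keys = K) (h : K.Nodup) :
    d.items = K.map (fun k => (k, d.getD k d0)) := by
  subst hK
  exact pv_items_eq_keys_map d d0 h

-- ===== VERDICT (by name: the statement is the Claim_ definition above) =====
theorem build_gantt_data_spec : Claim_equal_build_gantt_data := by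
  intro tts skills _hdom hpre
  obtain ⟨hs, _⟩ := hpre
  unfold Spec_build_gantt_data
  have hsplitA : tts.foldl
      (fun (acc : PySem.Dict String (List (List (String × Int))) × Int) t =>
        (acc.1.modify t.2.2.1 [] (fun l => l ++ [pvItemOf t]), max acc.2 t.2.2.2.2.1))
      (pvD0 skills, 0)
      = (tts.foldl (fun d t => d.modify t.2.2.1 [] (fun l => l ++ [pvItemOf t])) (pvD0 skills),
         tts.foldl (fun h t => max h t.2.2.2.2.1) 0) :=
    pv_foldl_prod (fun d t => d.modify t.2.2.1 [] (fun l => l ++ [pvItemOf t]))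
      (fun h t => max h t.2.2.2.2.1) tts (pvD0 skills) (0 : Int)
  have hsplitB : tts.foldl
      (fun (acc : Int × List ((Int × Int × Int) × String × List (String × Int))) t =>
        ((if t.2.2.2.2.1 > acc.1 then t.2.2.2.2.1 else acc.1), acc.2 ++ [pvMkF t]))
      (0, [])
      = (tts.foldl (fun h t => if t.2.2.2.2.1 > h then t.2.2.2.2.1 else h) 0,
         tts.foldl (fun l t => l ++ [pvMkF t]) []) :=
    pv_foldl_prod (fun h t => if t.2.2.2.2.1 > h then t.2.2.2.2.1 else h)
      (fun l t => l ++ [pvMkF t]) tts (0 : Int)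
      ([] : List ((Int × Int × Int) × String × List (String × Int)))
  show ((skills.foldl (fun d s => d.modify s [] (fun l => PySem.List.sorted l pvItemKey))
          (tts.foldl
            (fun (acc : PySem.Dict String (List (List (String × Int))) × Int) t =>
              (acc.1.modify t.2.2.1 [] (fun l => l ++ [pvItemOf t]), max acc.2 t.2.2.2.2.1))
            (pvD0 skills, 0)).1).items,
        (tts.foldl
          (fun (acc : PySem.Dict String (List (List (String × Int))) × Int) t =>
            (acc.1.modify t.2.2.1 [] (fun l => l ++ [pvItemOf t]), max acc.2 t.2.2.2.2.1))
          (pvD0 skills, 0)).2)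
      = (((PySem.List.sorted
            (tts.foldl
              (fun (acc : Int × List ((Int × Int × Int) × String × List (String × Int))) t =>
                ((if t.2.2.2.2.1 > acc.1 then t.2.2.2.2.1 else acc.1), acc.2 ++ [pvMkF t]))
              (0, [])).2 (fun u => pvLex3 u.1)).foldl
            (fun d u => d.modify u.2.1 [] (fun l => l ++ [u.2.2])) (pvD0 skills)).items,
         (tts.foldl
            (fun (acc : Int × List ((Int × Int × Int) × String × List (String × Int))) t =>
              ((if t.2.2.2.2.1 > acc.1 then t.2.2.2.2.1 else acc.1), acc.2 ++ [pvMkF t]))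
            (0, [])).1)
  rw [hsplitA, hsplitB]
  have hflat : tts.foldl (fun l t => l ++ [pvMkF t]) [] = tts.map pvMkF := by
    simpa using pv_foldl_append_map pvMkF tts []
  rw [hflat]
  have hmax : (fun (h : Int) (t : Int × Int × String × Int × Int × Int) => max h t.2.2.2.2.1)
      = (fun h t => if t.2.2.2.2.1 > h then t.2.2.2.2.1 else h) := by
    funext h t
    rw [max_def]
    split_ifs <;> omega
  have hnodupK : (PySem.Set.ofList skills).Nodup := PySem.Set.nodup_ofList skills
  refine Prod.ext ?_ ?_
  · show (skills.foldl (fun d s => d.modify s [] (fun l => PySem.List.sorted l pvItemKey))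
        (tts.foldl (fun d t => d.modify t.2.2.1 [] (fun l => l ++ [pvItemOf t])) (pvD0 skills))).items
      = ((PySem.List.sorted (tts.map pvMkF) (fun u => pvLex3 u.1)).foldl
          (fun d u => d.modify u.2.1 [] (fun l => l ++ [u.2.2])) (pvD0 skills)).items
    rw [pv_items_of_keys _ [] _ (pv_keysA tts skills hs) hnodupK,
      pv_items_of_keys _ [] _ (pv_keysB tts skills hs) hnodupK]
    refine List.map_congr_left (fun c hc => ?_)
    have hcs : c ∈ skills := (PySem.Set.mem_ofList skills c).mp hc
    exact congrArg (Prod.mk c) ((pv_hVA tts skills c hcs).trans (pv_hVB tts skills c).symm)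
  · show tts.foldl (fun h t => max h t.2.2.2.2.1) 0
      = tts.foldl (fun h t => if t.2.2.2.2.1 > h then t.2.2.2.2.1 else h) 0
    rw [hmax]
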